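-- pv_equiv track=rewrite | github.com/pablodg12/clases_progra | p2.py | calcular_precio
-- ===== SOURCE A (Python) =====
-- def calcular_precio(llegada):
--     precio_total = 0
--     for letra_2 in llegada:
--         if letra_2 == 'M':
--             precio_total = precio_total + 1000
--         elif letra_2 == 'C':
--             precio_total += 5000
--         elif letra_2 == 'A':
--             precio_total += 2500
--     return(precio_total)
-- ===== SOURCE B (Python) =====
-- def calcular_precio(llegada):
--     return llegada.count('M') * 1000 + llegada.count('C') * 5000 + llegada.count('A') * 2500
-- ===== Notes on version B (the rewrite author's own statement) =====
-- stated objective: simpler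
-- what changed: Replaces the single accumulating loop with if/elif branches by a closed-form weighted sum of three str.count scans.
import Mathlib
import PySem

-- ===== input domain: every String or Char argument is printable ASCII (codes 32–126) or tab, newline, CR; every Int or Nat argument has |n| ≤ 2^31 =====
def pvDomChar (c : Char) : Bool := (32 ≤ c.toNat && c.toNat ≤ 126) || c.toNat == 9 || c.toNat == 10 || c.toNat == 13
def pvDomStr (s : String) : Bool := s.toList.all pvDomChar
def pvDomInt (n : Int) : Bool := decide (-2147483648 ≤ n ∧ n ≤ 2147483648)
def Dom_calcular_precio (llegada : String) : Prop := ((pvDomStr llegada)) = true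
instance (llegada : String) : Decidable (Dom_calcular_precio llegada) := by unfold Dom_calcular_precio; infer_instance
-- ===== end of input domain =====

-- B replaces A's single accumulating if/elif loop by a closed-form weighted sum of three count scans (objective: simpler).

-- ===== PORT A =====
def calcular_precio (llegada : String) : Int :=
  llegada.toList.foldl
    (fun precio_total letra_2 =>
      if letra_2 == 'M' then precio_total + 1000
      else if letra_2 == 'C' then precio_total + 5000
      else if letra_2 == 'A' then precio_total + 2500
      else precio_total) 0

-- ===== PORT B =====
def calcular_precio_alt (llegada : String) : Int :=
  (PySem.Str.count llegada "M" : Int) * 1000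
    + (PySem.Str.count llegada "C" : Int) * 5000
    + (PySem.Str.count llegada "A" : Int) * 2500

-- ===== PRECONDITION & SPEC =====
def Spec_calcular_precio (llegada : String) (out : Int) : Prop := out = calcular_precio_alt llegada
instance (llegada : String) (out : Int) : Decidable (Spec_calcular_precio llegada out) := by unfold Spec_calcular_precio; infer_instance

-- ===== CLAIM (what is proved, stated in full; the proofs are below) =====
def Claim_equal_calcular_precio : Prop := ∀ (llegada : String), Dom_calcular_precio llegada → Spec_calcular_precio llegada (calcular_precio llegada)

-- ===== LEMMAS AND PROOFS =====

-- Chars.count with a single-character pattern is List.count (on sufficient fuel)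
theorem count_go_singleton (c : Char) (l : List Char) (fuel acc : Nat)
    (h : l.length ≤ fuel) :
    PySem.Chars.count.go [c] fuel l acc = acc + l.count c := by
  induction l generalizing fuel acc with
  | nil => cases fuel <;> simp [PySem.Chars.count.go]
  | cons x t ih =>
    cases fuel with
    | zero => simp at h
    | succ f =>
      simp only [List.length_cons, Nat.succ_le_succ_iff] at h
      rcases eq_or_ne x c with hx | hx
      · subst hx
        simp only [PySem.Chars.count.go, List.isPrefixOf, beq_self_eq_true,
          Bool.true_and, if_pos, List.length_cons,
          List.length_nil, List.drop_succ_cons, List.drop_zero]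
        rw [ih f (acc + 1) h, List.count_cons_self]
        omega
      · have hbeq : (c == x) = false := by
          simpa [beq_iff_eq] using hx.symm
        simp only [PySem.Chars.count.go, List.isPrefixOf, hbeq,
          Bool.false_and, if_neg, Bool.false_eq_true, not_false_eq_true]
        rw [ih f acc h, List.count_cons_of_ne hx]

theorem chars_count_singleton (c : Char) (l : List Char) :
    PySem.Chars.count l [c] = l.count c := by
  simp [PySem.Chars.count, count_go_singleton c l l.length 0 le_rfl]

theorem foldl_price (l : List Char) (acc : Int) :
    l.foldl
      (fun precio_total letra_2 =>
        if letra_2 == 'M' then precio_total + 1000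
        else if letra_2 == 'C' then precio_total + 5000
        else if letra_2 == 'A' then precio_total + 2500
        else precio_total) acc
      = acc + (l.count 'M' : Int) * 1000 + (l.count 'C' : Int) * 5000
          + (l.count 'A' : Int) * 2500 := by
  induction l generalizing acc with
  | nil => simp
  | cons x t ih =>
    rw [List.foldl_cons]
    rcases eq_or_ne x 'M' with hM | hM
    · subst hM
      rw [if_pos (by simp), ih, List.count_cons_self,
        List.count_cons_of_ne (by decide), List.count_cons_of_ne (by decide)]
      push_cast; ring
    · rw [if_neg (by simpa using hM)]
      rcases eq_or_ne x 'C' with hC | hC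
      · subst hC
        rw [if_pos (by simp), ih, List.count_cons_self,
          List.count_cons_of_ne (by decide), List.count_cons_of_ne (by decide)]
        push_cast; ring
      · rw [if_neg (by simpa using hC)]
        rcases eq_or_ne x 'A' with hA | hA
        · subst hA
          rw [if_pos (by simp), ih, List.count_cons_self,
            List.count_cons_of_ne (by decide), List.count_cons_of_ne (by decide)]
          push_cast; ring
        · rw [if_neg (by simpa using hA), ih,
            List.count_cons_of_ne hM, List.count_cons_of_ne hC,
            List.count_cons_of_ne hA]

-- ===== VERDICT (by name: the statement is the Claim_ definition above) =====
theorem calcular_precio_spec : Claim_equal_calcular_precio := by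
  intro llegada _
  unfold Spec_calcular_precio calcular_precio calcular_precio_alt
  rw [foldl_price]
  simp [PySem.Str.count_eq, chars_count_singleton]
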